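-- pv_equiv track=rewrite | github.com/zhengshuomm/mianshi | microsoft/max_num_suffix.py | max_count_suffix
-- ===== SOURCE A (Python) =====
-- def max_count_suffix(nums, query):
--     n = len(nums)
--     max_from_right = [0] * n
--     count_max_from_right = [0] * n
--
--     max_val = float('-inf')
--     count = 0
--
--     for i in reversed(range(n)):
--         if nums[i] > max_val:
--             max_val = nums[i]
--             count = 1
--         elif nums[i] == max_val:
--             count += 1
--         # 如果 nums[i] < max_val, count 不变
--         max_from_right[i] = max_val
--         count_max_from_right[i] = count
--
--     # 查询结果
--     result = [count_max_from_right[q] for q in query]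
--     return result
-- ===== SOURCE B (Python) =====
-- def max_count_suffix(nums, query):
--     return [nums[q:].count(max(nums[q:])) for q in query]
-- ===== Notes on version B (the rewrite author's own statement) =====
-- stated objective: simpler
-- what changed: Replaced A's reverse-scan precomputation of two auxiliary arrays with a direct per-query computation: each answer is nums[q:].count(max(nums[q:])), so no arrays and no scan over nums outside the queried suffix.
import Mathlib
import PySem

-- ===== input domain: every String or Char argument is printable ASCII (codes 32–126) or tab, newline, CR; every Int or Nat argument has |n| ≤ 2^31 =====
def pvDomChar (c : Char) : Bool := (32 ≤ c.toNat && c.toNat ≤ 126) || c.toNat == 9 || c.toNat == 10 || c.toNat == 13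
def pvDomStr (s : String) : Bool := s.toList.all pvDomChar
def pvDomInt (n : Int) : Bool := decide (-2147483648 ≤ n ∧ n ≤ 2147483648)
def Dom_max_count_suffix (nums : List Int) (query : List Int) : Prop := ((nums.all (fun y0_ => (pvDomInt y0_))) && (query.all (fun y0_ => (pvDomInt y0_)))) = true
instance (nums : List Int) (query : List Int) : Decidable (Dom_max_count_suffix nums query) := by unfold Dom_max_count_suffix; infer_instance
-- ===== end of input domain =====

-- B replaces A's reverse-scan precomputation of per-suffix max-counts by a direct per-query
-- computation (count of max of the sliced suffix); simpler, no auxiliary arrays, but O(n*q).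


-- ===== PORT A =====
-- A's reverse loop over i = n-1 … 0, carrying (max_val, count) and building count_max_from_right
-- front-to-back; max_val = float('-inf') is modelled as `none` (every Int exceeds it).
-- Returns (max_val, count, count_max_from_right); max_from_right is built in A but unused for the result.
def aLoop : List Int → (Option Int × Int × List Int)
  | [] => (none, 0, [])
  | x :: rest =>
    let (m, c, acc) := aLoop rest
    match m with
    | none => (some x, 1, 1 :: acc)
    | some mv =>
      if x > mv then (some x, 1, 1 :: acc)
      else if x == mv then (some mv, c + 1, (c + 1) :: acc)
      else (some mv, c, c :: acc)

def max_count_suffix (nums : List Int) (query : List Int) : List Int :=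
  let cnt := (aLoop nums).2.2
  -- count_max_from_right[q]: Python raises IndexError out of range; Pre_ excludes that, default 0 here
  query.map (fun q => (PySem.List.pyGet? cnt q).getD 0)

-- ===== PORT B =====
-- Source B: [nums[q:].count(max(nums[q:])) for q in query].  max([]) raises ValueError (Pre_
-- excludes q ≥ len, the only way the slice is empty under Pre_); default 0 there.
def max_count_suffix_alt (nums : List Int) (query : List Int) : List Int :=
  query.map (fun q =>
    let suf := PySem.List.slice nums (some q) none
    match PySem.List.max? suf (fun y => y) with
    | some m => (suf.count m : Int)
    | none => 0)

-- ===== PRECONDITION & SPEC =====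
-- Pre_: every query index is a valid Python index into nums (else A raises IndexError).
def Pre_max_count_suffix (nums : List Int) (query : List Int) : Prop :=
  ∀ q ∈ query, PySem.Raise.InRange nums.length q
instance (nums : List Int) (query : List Int) : Decidable (Pre_max_count_suffix nums query) := by unfold Pre_max_count_suffix; infer_instance
def pvWitness_max_count_suffix : List Int × List Int := ([3, 1, 3], [0, 1, 2, -1])

def Spec_max_count_suffix (nums : List Int) (query : List Int) (out : List Int) : Prop := out = max_count_suffix_alt nums query
instance (nums : List Int) (query : List Int) (out : List Int) : Decidable (Spec_max_count_suffix nums query out) := by unfold Spec_max_count_suffix; infer_instance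

-- ===== CLAIM (what is proved, stated in full; the proofs are below) =====
def Claim_equal_max_count_suffix : Prop := ∀ (nums : List Int) (query : List Int), Dom_max_count_suffix nums query → Pre_max_count_suffix nums query → Spec_max_count_suffix nums query (max_count_suffix nums query)

-- ===== LEMMAS AND PROOFS =====

-- B's per-query value as a function of the suffix list
def sufCount (l : List Int) : Int :=
  match PySem.List.max? l (fun y => y) with
  | some m => (l.count m : Int)
  | none => 0

-- the list of sufCounts of all suffixes, front to back
def tcounts : List Int → List Int
  | [] => []
  | x :: rest => sufCount (x :: rest) :: tcounts rest

theorem foldl_max_hoist (l : List Int) : ∀ (a b : Int),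
    l.foldl max (max a b) = max a (l.foldl max b) := by
  induction l with
  | nil => intro a b; rfl
  | cons c t ih =>
    intro a b
    show t.foldl max (max (max a b) c) = max a (t.foldl max (max b c))
    rw [max_assoc, ih]

theorem sufCount_cons (x : Int) (r : Int) (rs : List Int) (mv : Int)
    (h : PySem.List.max? (r :: rs) (fun y => y) = some mv) :
    sufCount (x :: r :: rs) =
      if x > mv then 1
      else if x == mv then sufCount (r :: rs) + 1
      else sufCount (r :: rs) := by
  have hmax : PySem.List.max? (x :: r :: rs) (fun y => y) = some (max x mv) := by
    rw [PySem.List.max?_id_cons] at h ⊢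
    have h' : rs.foldl max r = mv := by simpa using h
    have : (r :: rs).foldl max x = max x mv := by
      show rs.foldl max (max x r) = max x mv
      rw [foldl_max_hoist, h']
    rw [this]
  have hle : ∀ y ∈ r :: rs, y ≤ mv := by
    intro y hy; simpa using PySem.List.max?_isMax h y hy
  unfold sufCount
  rw [hmax, h]
  by_cases hgt : x > mv
  · have hmx : max x mv = x := by omega
    have hnotmem : x ∉ r :: rs := fun hm => absurd (hle x hm) (by omega)
    simp [hgt, hmx, List.count_eq_zero.mpr hnotmem]
  · have hmx : max x mv = mv := by omega
    by_cases heq : x = mv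
    · subst heq
      simp [List.count_cons]
    · simp [hgt, heq, hmx, List.count_cons]

theorem aLoop_spec (l : List Int) :
    aLoop l = (PySem.List.max? l (fun y => y), sufCount l, tcounts l) := by
  induction l with
  | nil => rfl
  | cons x rest ih =>
    cases rest with
    | nil =>
      simp [aLoop, tcounts, sufCount, PySem.List.max?_id_cons]
    | cons r rs =>
      obtain ⟨mv, hmv⟩ : ∃ mv, PySem.List.max? (r :: rs) (fun y => y) = some mv :=
        ⟨_, PySem.List.max?_id_cons r rs⟩
      have hcount := sufCount_cons x r rs mv hmv
      have hmax : PySem.List.max? (x :: r :: rs) (fun y => y) = some (max x mv) := by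
        rw [PySem.List.max?_id_cons] at hmv ⊢
        have h' : rs.foldl max r = mv := by simpa using hmv
        have : rs.foldl max (max x r) = max x mv := by
          rw [foldl_max_hoist, h']
        exact congrArg some this
      show (let s := aLoop (r :: rs)
            match s.1 with
            | none => (some x, 1, 1 :: s.2.2)
            | some mv => if x > mv then (some x, 1, 1 :: s.2.2)
                else if x == mv then (some mv, s.2.1 + 1, (s.2.1 + 1) :: s.2.2)
                else (some mv, s.2.1, s.2.1 :: s.2.2)) = _
      rw [ih, hmv]
      show (if x > mv then (some x, 1, 1 :: tcounts (r :: rs))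
            else if x == mv then (some mv, sufCount (r :: rs) + 1, (sufCount (r :: rs) + 1) :: tcounts (r :: rs))
            else (some mv, sufCount (r :: rs), sufCount (r :: rs) :: tcounts (r :: rs))) = _
      have htc : tcounts (x :: r :: rs) = sufCount (x :: r :: rs) :: tcounts (r :: rs) := rfl
      by_cases hgt : x > mv
      · have hmx : max x mv = x := by omega
        simp only [hgt, if_true, hmax, htc, hcount, hmx]
      · have hmx : max x mv = mv := by omega
        by_cases heq : x = mv
        · subst heq; simp [hmax, htc, hcount]
        · have h1 : (x == mv) = false := by simp [heq]
          simp [hgt, h1, hmax, hmx, htc, hcount]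

theorem tcounts_length (l : List Int) : (tcounts l).length = l.length := by
  induction l with
  | nil => rfl
  | cons x rest ih => simp [tcounts, ih]

theorem tcounts_getElem? (l : List Int) (i : Nat) (h : i < l.length) :
    (tcounts l)[i]? = some (sufCount (l.drop i)) := by
  induction l generalizing i with
  | nil => simp at h
  | cons x rest ih =>
    cases i with
    | zero => rfl
    | succ j =>
      show (tcounts rest)[j]? = _
      exact ih j (by simpa using h)

-- ===== VERDICT (by name: the statement is the Claim_ definition above) =====
theorem max_count_suffix_spec : Claim_equal_max_count_suffix := by
  intro nums query _ hpre
  unfold Spec_max_count_suffix max_count_suffix max_count_suffix_alt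
  apply List.map_congr_left
  intro q hq
  have hin := hpre q hq
  have hrange : -(nums.length : Int) ≤ q ∧ q < nums.length := by
    simpa [PySem.Raise.InRange] using hin
  rw [aLoop_spec]
  by_cases hpos : 0 ≤ q
  · have hlt : q.toNat < nums.length := by omega
    rw [PySem.List.pyGet?_of_nonneg _ hpos,
        tcounts_getElem? _ _ (by simpa [tcounts_length] using hlt),
        PySem.List.slice_from _ hpos]
    simp [sufCount]
  · have hk0 : 0 < (-q).toNat := by omega
    have hkle : (-q).toNat ≤ nums.length := by omega
    have hq' : q = -(((-q).toNat : Nat) : Int) := by omega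
    rw [hq',
        PySem.List.pyGet?_neg_natCast (tcounts nums) (-q).toNat hk0
          (by rw [tcounts_length]; exact hkle),
        tcounts_length,
        tcounts_getElem? _ _ (by omega),
        PySem.List.slice_from_neg_natCast nums (-q).toNat hk0]
    simp [sufCount]
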